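-- pv_equiv track=rewrite | github.com/siyoonni/ppp-2025 | hw10/data.py | get_rain_event_totals
-- ===== SOURCE A (Python) =====
-- def get_rain_event_totals(rainfalls):
--     event_totals = []
--     current_total = 0
--
--     for rain in rainfalls:
--         if rain > 0:
--             current_total += rain
--         else:
--             if current_total > 0:
--                 event_totals.append(current_total)
--             current_total = 0
--     if current_total > 0:
--         event_totals.append(current_total)
--
--     return event_totals
-- ===== SOURCE B (Python) =====
-- from itertools import groupby
--
-- def get_rain_event_totals(rainfalls):
--     return [sum(g) for k, g in groupby(rainfalls, key=lambda x: x > 0) if k]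
-- ===== Notes on version B (the rewrite author's own statement) =====
-- stated objective: idiomatic
-- what changed: Replaces the manual running-accumulator state machine (with end-of-loop flush) by itertools.groupby partitioning the list into alternating positive/non-positive runs and summing the positive groups in one comprehension.
import Mathlib
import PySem

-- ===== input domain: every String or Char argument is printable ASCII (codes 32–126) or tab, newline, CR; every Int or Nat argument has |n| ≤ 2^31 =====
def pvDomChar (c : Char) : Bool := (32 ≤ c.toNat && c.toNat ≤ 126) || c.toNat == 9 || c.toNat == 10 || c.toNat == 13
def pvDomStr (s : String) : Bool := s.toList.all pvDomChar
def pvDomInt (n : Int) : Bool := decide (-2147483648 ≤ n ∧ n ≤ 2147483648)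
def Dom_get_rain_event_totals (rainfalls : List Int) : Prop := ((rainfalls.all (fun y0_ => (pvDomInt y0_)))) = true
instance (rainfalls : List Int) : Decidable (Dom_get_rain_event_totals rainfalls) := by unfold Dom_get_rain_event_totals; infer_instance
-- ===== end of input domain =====

-- B replaces A's running-accumulator state machine by grouping the list into
-- maximal positive runs and summing each (idiomatic groupby decomposition).


-- ===== PORT A =====
-- the for-loop of A as structural recursion over the same state
-- (event_totals = acc, current_total = cur), with the final flush in the [] case
def pvLoopA (acc : List Int) (cur : Int) : List Int → List Int
  | [] => if cur > 0 then acc ++ [cur] else acc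
  | rain :: rs =>
      if rain > 0 then pvLoopA acc (cur + rain) rs
      else pvLoopA (if cur > 0 then acc ++ [cur] else acc) 0 rs

def get_rain_event_totals (rainfalls : List Int) : List Int :=
  pvLoopA [] 0 rainfalls

-- ===== PORT B =====
-- groupby(key = x > 0): each step peels one maximal group; positive groups are
-- summed and kept, a non-positive element just advances the grouping
def get_rain_event_totals_alt (rainfalls : List Int) : List Int :=
  match rainfalls with
  | [] => []
  | x :: xs =>
      if x > 0 then
        (x + (xs.takeWhile (fun y => y > 0)).sum)
          :: get_rain_event_totals_alt (xs.dropWhile (fun y => y > 0))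
      else get_rain_event_totals_alt xs
termination_by rainfalls.length
decreasing_by
  · exact Nat.lt_succ_of_le (List.length_dropWhile_le _ _)
  · exact Nat.lt_succ_self _

-- ===== PRECONDITION & SPEC =====
def Spec_get_rain_event_totals (rainfalls : List Int) (out : List Int) : Prop := out = get_rain_event_totals_alt rainfalls
instance (rainfalls : List Int) (out : List Int) : Decidable (Spec_get_rain_event_totals rainfalls out) := by unfold Spec_get_rain_event_totals; infer_instance

-- ===== CLAIM (what is proved, stated in full; the proofs are below) =====
def Claim_equal_get_rain_event_totals : Prop := ∀ (rainfalls : List Int), Dom_get_rain_event_totals rainfalls → Spec_get_rain_event_totals rainfalls (get_rain_event_totals rainfalls)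

-- ===== LEMMAS AND PROOFS =====

-- the accumulator is only ever appended to
theorem pvLoopA_append (xs : List Int) : ∀ (acc : List Int) (cur : Int),
    pvLoopA acc cur xs = acc ++ pvLoopA [] cur xs := by
  induction xs with
  | nil => intro acc cur; simp [pvLoopA]; split <;> simp
  | cons x xs ih =>
      intro acc cur
      simp only [pvLoopA]
      split
      · exact ih acc (cur + x)
      · by_cases hc : cur > 0
        · rw [if_pos hc, if_pos hc, ih, ih ([] ++ [cur]) 0]
          simp
        · rw [if_neg hc, if_neg hc, ih]

-- loop invariant: the pending total cur, if positive, heads the first run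
theorem pvLoopA_eq (xs : List Int) : ∀ (cur : Int), 0 ≤ cur →
    pvLoopA [] cur xs =
      if cur > 0 then
        (cur + (xs.takeWhile (fun y => y > 0)).sum)
          :: get_rain_event_totals_alt (xs.dropWhile (fun y => y > 0))
      else get_rain_event_totals_alt xs := by
  induction xs with
  | nil => intro cur _; simp [pvLoopA, get_rain_event_totals_alt]
  | cons x xs ih =>
      intro cur hcur
      simp only [pvLoopA]
      by_cases hx : x > 0
      · rw [if_pos hx, ih (cur + x) (by omega)]
        by_cases hc : cur > 0
        · have hcx : cur + x > 0 := by omega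
          rw [if_pos hcx, if_pos hc]
          simp [hx, add_assoc]
        · have hc0 : cur = 0 := by omega
          subst hc0
          rw [if_pos (by omega : (0:Int) + x > 0), if_neg hc]
          rw [get_rain_event_totals_alt]
          simp [hx]
      · rw [if_neg hx, pvLoopA_append, ih 0 le_rfl]
        rw [if_neg (by omega : ¬ (0:Int) > 0)]
        by_cases hc : cur > 0
        · rw [if_pos hc, if_pos hc]
          simp [hx]
          rw [get_rain_event_totals_alt]
          simp [hx]
        · rw [if_neg hc, if_neg hc]
          rw [get_rain_event_totals_alt]
          simp [hx]

-- ===== VERDICT (by name: the statement is the Claim_ definition above) =====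
theorem get_rain_event_totals_spec : Claim_equal_get_rain_event_totals := by
  intro xs _
  show get_rain_event_totals xs = get_rain_event_totals_alt xs
  rw [get_rain_event_totals, pvLoopA_eq _ _ le_rfl]
  simp
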